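-- pv_equiv track=rewrite | github.com/1160300203/compiler_lab | main.py | delCom
-- ===== SOURCE A (Python) =====
-- def delCom(src_code, i):
--     curState = 0
--     string = ''
--     while i < len(src_code):
--         x = src_code[i]
--         if curState == 0 and x == '/':
--             curState = 1
--         elif curState == 1 and x == '*':
--             curState = 2
--         elif curState == 2 and x != '*':
--             curState = 2
--         elif curState == 2 and x == '*':
--             curState = 3
--         elif curState == 3 and x == '*':
--             curState = 3
--         elif curState == 3 and x != '/':
--             curState = 2
--         elif curState == 3 and x == '/':
--             string += x
--             return i+1, string
--         else:
--             raise Exception('Input error at '+str(i)+'th character '+x)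
--         string += x
--         i += 1
-- ===== SOURCE B (Python) =====
-- def delCom(src_code, i):
--     if i >= len(src_code):
--         return None
--     x = src_code[i]
--     if x != '/':
--         raise Exception('Input error at '+str(i)+'th character '+x)
--     if i + 1 >= len(src_code):
--         return None
--     y = src_code[i+1]
--     if y != '*':
--         raise Exception('Input error at '+str(i+1)+'th character '+y)
--     end = src_code.find('*/', i+2)
--     if end == -1:
--         return None
--     return end + 2, src_code[i:end+2]
-- ===== Notes on version B (the rewrite author's own statement) =====
-- stated objective: simpler
-- what changed: Replaces the per-character 4-state machine loop with a bounds/opener check followed by a single src_code.find('*/', i+2) substring search and one slice; Pre_ excludes inputs where A raises (bad opener or index out of range) and negative i, on which A's value comes from Python's negative-index wraparound rescanning the string from a wrapped position, outside the natural domain of a scan cursor.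
-- outside the precondition, e.g. on delCom('/*ab*/', -6): A returns (0, '/*ab*/'), B returns (6, '/*ab*/')
import Mathlib
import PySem

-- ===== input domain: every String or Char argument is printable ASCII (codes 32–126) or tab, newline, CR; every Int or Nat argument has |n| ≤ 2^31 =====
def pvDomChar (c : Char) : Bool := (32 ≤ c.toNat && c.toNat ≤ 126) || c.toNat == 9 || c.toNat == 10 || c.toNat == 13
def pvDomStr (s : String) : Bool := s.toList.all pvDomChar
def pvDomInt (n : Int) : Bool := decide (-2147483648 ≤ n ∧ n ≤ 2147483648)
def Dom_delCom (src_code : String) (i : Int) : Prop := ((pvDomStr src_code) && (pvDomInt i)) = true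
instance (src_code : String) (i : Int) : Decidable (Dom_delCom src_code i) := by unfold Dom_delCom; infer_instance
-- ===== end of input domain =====

-- B replaces A's per-character 4-state machine with an opener check, one find("*/", i+2) search and a slice (objective: simpler).

-- ===== PORT A =====
-- literal port of A's while-loop state machine; the 'raise' branch and an IndexError from
-- src_code[i] return none here — both are excluded by Pre_delCom.
def delComLoopA (src : List Char) (i : Int) (cur : Int) (acc : List Char) :
    Option (Int × String) :=
  if _h : i < (src.length : Int) then
    match PySem.List.pyGet? src i with
    | none => none  -- IndexError (i < -len); excluded by Pre_delCom
    | some x =>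
      if cur = 0 ∧ x = '/' then delComLoopA src (i+1) 1 (acc ++ [x])
      else if cur = 1 ∧ x = '*' then delComLoopA src (i+1) 2 (acc ++ [x])
      else if cur = 2 ∧ x ≠ '*' then delComLoopA src (i+1) 2 (acc ++ [x])
      else if cur = 2 ∧ x = '*' then delComLoopA src (i+1) 3 (acc ++ [x])
      else if cur = 3 ∧ x = '*' then delComLoopA src (i+1) 3 (acc ++ [x])
      else if cur = 3 ∧ x ≠ '/' then delComLoopA src (i+1) 2 (acc ++ [x])
      else if cur = 3 ∧ x = '/' then some (i+1, String.mk (acc ++ [x]))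
      else none  -- raise Exception('Input error …'); excluded by Pre_delCom
  else none
termination_by ((src.length : Int) - i).toNat
decreasing_by all_goals omega

def delCom (src_code : String) (i : Int) : Option (Int × String) :=
  delComLoopA src_code.toList i 0 []

-- ===== PORT B =====
-- port of Source B: the two raise sites return none (excluded by Pre_delCom)
def delCom_alt (src_code : String) (i : Int) : Option (Int × String) :=
  let src := src_code.toList
  if i ≥ (src.length : Int) then none
  else
    match PySem.List.pyGet? src i with
    | none => none  -- IndexError; excluded by Pre_delCom
    | some x =>
      if x ≠ '/' then none  -- raise; excluded by Pre_delCom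
      else if i + 1 ≥ (src.length : Int) then none
      else
        match PySem.List.pyGet? src (i+1) with
        | none => none
        | some y =>
          if y ≠ '*' then none  -- raise; excluded by Pre_delCom
          else
            let e := PySem.Str.findFrom src_code "*/" (i+2) none
            if e = -1 then none
            else some (e + 2, String.mk (PySem.List.slice src (some i) (some (e+2))))

-- ===== PRECONDITION & SPEC =====
-- Pre_ excludes inputs where A raises (Exception on a bad opener, IndexError for i < -len) and
-- negative i, on which A's returned value is an artefact of Python's negative-index wraparound
-- (the scan restarts from a wrapped position) — i is a scan cursor, naturally non-negative.
def Pre_delCom (src_code : String) (i : Int) : Prop :=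
  0 ≤ i ∧
  ((src_code.toList.length : Int) ≤ i ∨
    (PySem.List.pyGet? src_code.toList i = some '/' ∧
      ((src_code.toList.length : Int) ≤ i + 1 ∨
        PySem.List.pyGet? src_code.toList (i+1) = some '*')))
instance (src_code : String) (i : Int) : Decidable (Pre_delCom src_code i) := by
  unfold Pre_delCom; infer_instance

def pvWitness_delCom : String × Int := ("/* hi */ x", 0)

def Spec_delCom (src_code : String) (i : Int) (out : Option (Int × String)) : Prop := out = delCom_alt src_code i
instance (src_code : String) (i : Int) (out : Option (Int × String)) : Decidable (Spec_delCom src_code i out) := by unfold Spec_delCom; infer_instance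

-- ===== CLAIM (what is proved, stated in full; the proofs are below) =====
def Claim_equal_delCom : Prop := ∀ (src_code : String) (i : Int), Dom_delCom src_code i → Pre_delCom src_code i → Spec_delCom src_code i (delCom src_code i)

-- ===== LEMMAS AND PROOFS =====

-- first index e ≥ j with src[e] = '*' and src[e+1] = '/' (proof-only helper)
def firstCC (src : List Char) (j : Nat) : Option Nat :=
  if h : j + 1 < src.length then
    if src[j] = '*' ∧ src[j+1] = '/' then some j else firstCC src (j+1)
  else none
termination_by src.length - j

theorem firstCC_some {src : List Char} {j e : Nat} (h : firstCC src j = some e) :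
    j ≤ e ∧ ∃ h1 : e + 1 < src.length, src[e] = '*' ∧ src[e+1] = '/' ∧
      ∀ m, j ≤ m → m < e → ¬ (∃ hm : m + 1 < src.length, src[m] = '*' ∧ src[m+1] = '/') := by
  fun_induction firstCC src j with
  | case1 j h1 hcc =>
    obtain rfl : j = e := by simpa using h
    exact ⟨le_refl _, h1, hcc.1, hcc.2, fun m hm1 hm2 _ => absurd hm1 (by omega)⟩
  | case2 j h1 hcc ih =>
    obtain ⟨hle, he1, ha, hb, hmin⟩ := ih h
    refine ⟨by omega, he1, ha, hb, fun m hm1 hm2 hbad => ?_⟩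
    rcases Nat.eq_or_lt_of_le hm1 with rfl | hlt
    · exact hcc ⟨hbad.2.1, hbad.2.2⟩
    · exact hmin m hlt hm2 hbad
  | case3 j h1 => simp at h

theorem firstCC_none {src : List Char} {j : Nat} (h : firstCC src j = none) :
    ∀ m, j ≤ m → ¬ (∃ hm : m + 1 < src.length, src[m] = '*' ∧ src[m+1] = '/') := by
  fun_induction firstCC src j with
  | case1 j h1 hcc => simp at h
  | case2 j h1 hcc ih =>
    intro m hm1 hbad
    rcases Nat.eq_or_lt_of_le hm1 with rfl | hlt
    · exact hcc ⟨hbad.2.1, hbad.2.2⟩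
    · exact ih h m hlt hbad
  | case3 j h1 =>
    intro m hm1 hbad; exact absurd hbad.1 (by omega)

-- the match condition is exactly '"*/" is a prefix of src.drop e'
theorem prefix_iff_cc (src : List Char) (e : Nat) :
    ('*' :: '/' :: [] <+: src.drop e) ↔
      ∃ h : e + 1 < src.length, src[e] = '*' ∧ src[e+1] = '/' := by
  constructor
  · intro hp
    have hlen : 2 ≤ (src.drop e).length := hp.length_le
    rw [List.length_drop] at hlen
    have h1 : e + 1 < src.length := by omega
    have h0 : e < src.length := by omega
    rw [List.drop_eq_getElem_cons h0, List.drop_eq_getElem_cons h1] at hp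
    obtain ⟨t, ht⟩ := hp
    simp only [List.cons_append, List.nil_append, List.cons.injEq] at ht
    exact ⟨h1, ht.1.symm, ht.2.1.symm⟩
  · rintro ⟨h1, ha, hb⟩
    rw [List.drop_eq_getElem_cons (by omega : e < src.length), List.drop_eq_getElem_cons h1, ha, hb]
    exact ⟨src.drop (e+2), rfl⟩

-- bridge: firstCC equals Python's find("*/", j)
theorem firstCC_eq_findFrom (src : List Char) (j : Nat) (hj : j ≤ src.length) :
    PySem.Chars.findFrom src ('*' :: '/' :: []) (j : Int) none =
      (match firstCC src j with | none => -1 | some e => (e : Int)) := by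
  cases hcc : firstCC src j with
  | none =>
    rw [PySem.Chars.findFrom_natCast_eq_neg_one_iff src _ j hj]
    intro hinf
    obtain ⟨t, hpre, hsuf⟩ := List.infix_iff_prefix_suffix.mp hinf
    obtain ⟨u, hu⟩ := hsuf
    have ht : t = (src.drop j).drop u.length := by
      rw [← hu, List.drop_left]
    rw [ht, List.drop_drop] at hpre
    exact firstCC_none hcc (j + u.length) (by omega) ((prefix_iff_cc src (j + u.length)).mp hpre)
  | some e =>
    obtain ⟨hle, he1, ha, hb, hmin⟩ := firstCC_some hcc
    have hinf : ('*' :: '/' :: []) <:+: src.drop j := by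
      refine List.infix_iff_prefix_suffix.mpr ⟨src.drop e, (prefix_iff_cc src e).mpr ⟨he1, ha, hb⟩, ?_⟩
      rw [show src.drop e = (src.drop j).drop (e - j) from by rw [List.drop_drop]; congr 1; omega]
      exact List.drop_suffix _ _
    have hne : PySem.Chars.findFrom src ('*' :: '/' :: []) (j : Int) none ≠ -1 :=
      fun hn => ((PySem.Chars.findFrom_natCast_eq_neg_one_iff src _ j hj).mp hn) hinf
    obtain ⟨hge, hpre, hfmin⟩ := PySem.Chars.findFrom_natCast_spec src _ j hj hne
    set r := PySem.Chars.findFrom src ('*' :: '/' :: []) (j : Int) none with hr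
    have hr0 : 0 ≤ r := le_trans (by exact_mod_cast Int.ofNat_nonneg j) hge
    obtain ⟨hre1, hra, hrb⟩ := (prefix_iff_cc src r.toNat).mp hpre
    have hrj : j ≤ r.toNat := by omega
    have h1 : ¬ e < r.toNat := fun hlt => hfmin e hle hlt ((prefix_iff_cc src e).mpr ⟨he1, ha, hb⟩)
    have h2 : ¬ r.toNat < e := fun hlt => hmin r.toNat hrj hlt ⟨hre1, hra, hrb⟩
    exact (show r = (e : Int) by omega)

-- state-2/state-3 loop characterisation: the state machine from position j returns according to
-- the first "*/" match at or after j (state 2) / at or after j-1 (state 3; the previous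
-- character, already consumed, was the '*').
theorem loopA_23 (src : List Char) :
    ∀ fuel j acc, src.length - j ≤ fuel →
      (delComLoopA src (j : Int) 2 acc =
        (match firstCC src j with
         | none => none
         | some e => some ((e : Int) + 2, String.mk (acc ++ ((src.drop j).take (e + 2 - j)))))) ∧
      (∀ (_hj1 : 1 ≤ j), (∃ hp : j - 1 < src.length, src[j-1] = '*') →
        delComLoopA src (j : Int) 3 acc =
        (match firstCC src (j - 1) with
         | none => none
         | some e => some ((e : Int) + 2, String.mk (acc ++ ((src.drop j).take (e + 2 - j)))))) := by
  intro fuel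
  induction fuel with
  | zero =>
    intro j acc hfuel
    have hj : src.length ≤ j := by omega
    have hend : ∀ c, delComLoopA src (j : Int) c acc = none := by
      intro c; rw [delComLoopA]; simp; omega
    have hcc : ∀ k, j - 1 ≤ k → firstCC src k = none := by
      intro k hk; rw [firstCC]; simp; omega
    refine ⟨?_, fun _ _ => ?_⟩ <;> rw [hend, hcc _ (by omega)]
  | succ fuel ih =>
    intro j acc hfuel
    by_cases hj : j < src.length
    · have hget : PySem.List.pyGet? src (j : Int) = some src[j] := by
        simp [PySem.List.pyGet?, PySem.List.pyIdx?, hj]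
      have hcast : ((j : Int) + 1) = ((j+1 : Nat) : Int) := by push_cast; ring
      have htail : ∀ e, j ≤ e →
          (src.drop j).take (e + 2 - j) = src[j] :: (src.drop (j+1)).take (e + 2 - (j+1)) := by
        intro e he
        rw [List.drop_eq_getElem_cons hj, List.take_cons (by omega)]
        congr 1
      constructor
      · -- state 2
        rw [delComLoopA]
        simp only [hget]
        rw [dif_pos (by exact_mod_cast hj)]
        by_cases hstar : src[j] = '*'
        · rw [if_neg (by simp), if_neg (by simp), if_neg (by simp [hstar]), if_pos ⟨trivial, hstar⟩]
          have h3 := (ih (j+1) (acc ++ [src[j]]) (by omega)).2 (by omega)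
            ⟨by simpa using hj, by simpa using hstar⟩
          rw [hcast, h3]
          simp only [Nat.add_sub_cancel]
          cases hcc : firstCC src j with
          | none => rfl
          | some e =>
            obtain ⟨hle, -, -, -, -⟩ := firstCC_some hcc
            simp [htail e hle]
        · rw [if_neg (by simp), if_neg (by simp), if_pos ⟨trivial, hstar⟩]
          have h2 := (ih (j+1) (acc ++ [src[j]]) (by omega)).1
          rw [hcast, h2]
          have hccEq : firstCC src j = firstCC src (j+1) := by
            rw [firstCC]
            split
            · rw [if_neg (by simp [hstar])]
            · rw [(by rw [firstCC]; simp; omega : firstCC src (j+1) = none)]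
          rw [hccEq]
          cases hcc : firstCC src (j+1) with
          | none => rfl
          | some e =>
            obtain ⟨hle, -, -, -, -⟩ := firstCC_some hcc
            simp [htail e (by omega)]
      · -- state 3; the previously consumed character src[j-1] was '*'
        rintro hj1 ⟨hp, hprev⟩
        rw [delComLoopA]
        simp only [hget]
        rw [dif_pos (by exact_mod_cast hj)]
        by_cases hsl : src[j] = '/'
        · -- closing '/': the machine returns; the first match is at j-1
          rw [if_neg (by simp), if_neg (by simp), if_neg (by simp), if_neg (by simp),
              if_neg (by simp [hsl]), if_neg (by simp [hsl]), if_pos ⟨trivial, hsl⟩]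
          have hccj : firstCC src (j-1) = some (j-1) := by
            rw [firstCC]
            rw [dif_pos (by omega)]
            rw [if_pos ⟨hprev, by simpa [show j - 1 + 1 = j from by omega] using hsl⟩]
          rw [hccj]
          have ht1 : (src.drop j).take (j - 1 + 2 - j) = [src[j]] := by
            rw [show j - 1 + 2 - j = 1 from by omega, List.drop_eq_getElem_cons hj]
            rfl
          have hc : ((j - 1 : Nat) : Int) + 2 = (j : Int) + 1 := by omega
          show some ((j : Int) + 1, String.mk (acc ++ [src[j]])) =
            some (((j - 1 : Nat) : Int) + 2, String.mk (acc ++ (src.drop j).take (j - 1 + 2 - j)))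
          rw [ht1, hc]
        · by_cases hstar : src[j] = '*'
          · rw [if_neg (by simp), if_neg (by simp), if_neg (by simp), if_neg (by simp),
                if_pos ⟨trivial, hstar⟩]
            have h3 := (ih (j+1) (acc ++ [src[j]]) (by omega)).2 (by omega)
              ⟨by simpa using hj, by simpa using hstar⟩
            rw [hcast, h3]
            simp only [Nat.add_sub_cancel]
            have hccEq : firstCC src (j-1) = firstCC src j := by
              conv_lhs => rw [firstCC]
              split
              · rw [if_neg (by simp [show j - 1 + 1 = j from by omega, hsl]),
                    show j - 1 + 1 = j from by omega]
              · rw [(by rw [firstCC]; simp; omega : firstCC src j = none)]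
            rw [hccEq]
            cases hcc : firstCC src j with
            | none => rfl
            | some e =>
              obtain ⟨hle, -, -, -, -⟩ := firstCC_some hcc
              simp [htail e hle]
          · rw [if_neg (by simp), if_neg (by simp), if_neg (by simp [hstar]),
                if_neg (by simp [hstar]), if_neg (by simp [hstar]), if_pos ⟨trivial, hsl⟩]
            have h2 := (ih (j+1) (acc ++ [src[j]]) (by omega)).1
            rw [hcast, h2]
            have hccEq : firstCC src (j-1) = firstCC src (j+1) := by
              conv_lhs => rw [firstCC]
              split
              · rw [if_neg (by simp [show j - 1 + 1 = j from by omega, hsl]),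
                    show j - 1 + 1 = j from by omega, firstCC]
                split
                · rw [if_neg (by simp [hstar])]
                · rw [(by rw [firstCC]; simp; omega : firstCC src (j+1) = none)]
              · rw [(by rw [firstCC]; simp; omega : firstCC src (j+1) = none)]
            rw [hccEq]
            cases hcc : firstCC src (j+1) with
            | none => rfl
            | some e =>
              obtain ⟨hle, -, -, -, -⟩ := firstCC_some hcc
              simp [htail e (by omega)]
    · have hend : ∀ c, delComLoopA src (j : Int) c acc = none := by
        intro c; rw [delComLoopA]; simp; omega
      have hcc : ∀ k, j - 1 ≤ k → firstCC src k = none := by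
        intro k hk; rw [firstCC]; simp; omega
      refine ⟨?_, fun _ _ => ?_⟩ <;> rw [hend, hcc _ (by omega)]

-- ===== VERDICT (by name: the statement is the Claim_ definition above) =====
theorem delCom_spec : Claim_equal_delCom := by
  intro s i _hdom hpre
  obtain ⟨hi0, hpre⟩ := hpre
  unfold Spec_delCom delCom delCom_alt
  set src := s.toList with hsrc
  by_cases hlen : (src.length : Int) ≤ i
  · rw [if_pos (by omega), delComLoopA, dif_neg (by omega)]
  · push_neg at hlen
    rw [if_neg (by omega)]
    rcases hpre with h | ⟨hslash, hpre2⟩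
    · omega
    have hitlt : i.toNat < src.length := by omega
    have hslash' : src[i.toNat] = '/' := by
      rw [show i = ((i.toNat : Nat) : Int) from by omega, PySem.List.pyGet?_natCast] at hslash
      exact (List.getElem?_eq_some_iff.mp hslash).choose_spec
    have step0 : delComLoopA src i 0 [] = delComLoopA src (i+1) 1 ['/'] := by
      rw [delComLoopA, dif_pos (by omega)]
      simp [hslash]
    rw [step0]
    simp only [hslash]
    simp
    by_cases hlen1 : (src.length : Int) ≤ i + 1
    · -- string ends right after the '/': both return none
      rw [if_pos (by omega), delComLoopA, dif_neg (by omega)]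
    · push_neg at hlen1
      rw [if_neg (by omega)]
      rcases hpre2 with h | hstar
      · omega
      have hit1lt : i.toNat + 1 < src.length := by omega
      have hstar' : src[i.toNat + 1] = '*' := by
        rw [show i + 1 = ((i.toNat + 1 : Nat) : Int) from by omega, PySem.List.pyGet?_natCast] at hstar
        exact (List.getElem?_eq_some_iff.mp hstar).choose_spec
      have step1 : delComLoopA src (i+1) 1 ['/'] = delComLoopA src (i+1+1) 2 ['/', '*'] := by
        rw [delComLoopA, dif_pos (by omega)]
        simp [hstar]
      rw [step1]
      simp only [hstar]
      simp
      have hcast2 : i + 1 + 1 = ((i.toNat + 2 : Nat) : Int) := by omega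
      rw [hcast2, (loopA_23 src (src.length) (i.toNat + 2) (['/', '*']) (by omega)).1]
      -- B: find("*/", i+2) via the bridge
      have hfind : PySem.Chars.findFrom s.toList ('*' :: '/' :: []) (i + 2) none =
          (match firstCC src (i.toNat + 2) with | none => -1 | some e => (e : Int)) := by
        have hb := firstCC_eq_findFrom src (i.toNat + 2) (by omega)
        rw [show ((i.toNat + 2 : Nat) : Int) = i + 2 from by omega] at hb
        exact hb
      rw [hfind]
      cases hcc : firstCC src (i.toNat + 2) with
      | none => rfl
      | some e =>
        obtain ⟨hle, he1, -, -, -⟩ := firstCC_some hcc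
        show some ((e : Int) + 2, String.mk (['/', '*'] ++
            (src.drop (i.toNat + 2)).take (e + 2 - (i.toNat + 2)))) =
          (if ((e : Int)) = -1 then none
           else some ((e : Int) + 2, String.mk (PySem.List.slice src (some i) (some ((e : Int)+2)))))
        rw [if_neg (show ¬ ((e : Int)) = -1 by omega)]
        have hslice : PySem.List.slice src (some i) (some ((e : Int) + 2)) =
            '/' :: '*' :: (src.drop (i.toNat + 2)).take (e + 2 - (i.toNat + 2)) := by
          rw [PySem.List.slice_toNat src hi0 (by omega),
              show ((e : Int) + 2).toNat = e + 2 from by omega,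
              List.drop_eq_getElem_cons hitlt, List.take_cons (by omega),
              List.drop_eq_getElem_cons hit1lt, List.take_cons (by omega), hslash', hstar',
              show i.toNat + 1 + 1 = i.toNat + 2 from by omega]
          congr 2
        rw [hslice]
        rfl
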